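-- pv_equiv track=rewrite | github.com/jbowensii/MoriaManager | src/moria_manager/core/trade_data.py | parse_order_name
-- ===== SOURCE A (Python) =====
-- def parse_order_name(raw_name: str) -> str:
--     """Convert raw order name to display name.
--
--     e.g., "CarvedMuralSections_Order_Default" -> "Carved Mural Sections"
--     """
--     # Remove "_Order_Default" suffix
--     name = raw_name.replace("_Order_Default", "")
--
--     # Split on capital letters and join with spaces
--     result = []
--     for char in name:
--         if char.isupper() and result:
--             result.append(' ')
--         result.append(char)
--
--     return ''.join(result)
-- ===== SOURCE B (Python) =====
-- def parse_order_name(raw_name: str) -> str: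
--     """Convert raw order name to display name.
--
--     Staged: (1) compute the cut positions (every interior uppercase letter),
--     (2) slice the name at those positions, (3) join the slices with spaces.
--     """
--     name = raw_name.replace("_Order_Default", "")
--     bounds = [0] + [i for i in range(1, len(name)) if name[i].isupper()] + [len(name)]
--     words = [name[a:b] for a, b in zip(bounds, bounds[1:])]
--     return ' '.join(words)
-- ===== Notes on version B (the rewrite author's own statement) =====
-- stated objective: alternative
-- what changed: B is staged and index-based: it first computes the list of cut positions (interior uppercase letters), then slices the name at those positions, then space-joins the slices, instead of A's single stateful pass that interleaves space characters into a flat output buffer.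
import Mathlib
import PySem

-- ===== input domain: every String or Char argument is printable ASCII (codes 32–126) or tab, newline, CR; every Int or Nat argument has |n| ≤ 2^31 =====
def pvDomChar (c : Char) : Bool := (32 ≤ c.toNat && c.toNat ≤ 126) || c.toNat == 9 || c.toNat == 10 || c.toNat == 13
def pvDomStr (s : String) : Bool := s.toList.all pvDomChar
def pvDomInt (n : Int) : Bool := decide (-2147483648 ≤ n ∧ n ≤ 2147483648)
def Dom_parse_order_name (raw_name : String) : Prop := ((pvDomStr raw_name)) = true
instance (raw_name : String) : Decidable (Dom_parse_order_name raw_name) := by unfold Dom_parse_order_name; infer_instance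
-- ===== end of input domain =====

-- B (alternative, same cost): staged and index-based — it computes the list of cut positions
-- (interior uppercase letters), slices the name at those positions, and space-joins the slices,
-- instead of A's single stateful pass interleaving space characters into a flat output buffer.

-- ===== PORT A =====
def parse_order_name (raw_name : String) : String :=
  let name := PySem.Str.replace raw_name "_Order_Default" ""
  let result := name.toList.foldl
    (fun (result : List Char) char =>
      (if PySem.Chars.isupper char && !result.isEmpty then result ++ [' '] else result) ++ [char])
    []
  String.ofList result

-- ===== PORT B =====
-- cut positions: [i for i in range(1, len(name)) if name[i].isupper()]
def pon_cuts (cs : List Char) : List Nat :=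
  (List.range' 1 (cs.length - 1)).filter (fun i => PySem.Chars.isupper (cs.getD i ' '))

-- words: [name[a:b] for a, b in zip(bounds, bounds[1:])] with bounds = [0] + cuts + [len(name)]
def pon_words (cs : List Char) : List (List Char) :=
  List.zipWith (fun a b => (cs.drop a).take (b - a))
    (0 :: (pon_cuts cs ++ [cs.length])) (pon_cuts cs ++ [cs.length])

def parse_order_name_alt (raw_name : String) : String :=
  let name := PySem.Str.replace raw_name "_Order_Default" ""
  PySem.Str.join " " ((pon_words name.toList).map String.ofList)

-- ===== PRECONDITION & SPEC =====
def Spec_parse_order_name (raw_name : String) (out : String) : Prop := out = parse_order_name_alt raw_name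
instance (raw_name : String) (out : String) : Decidable (Spec_parse_order_name raw_name out) := by unfold Spec_parse_order_name; infer_instance

-- ===== CLAIM (what is proved, stated in full; the proofs are below) =====
def Claim_equal_parse_order_name : Prop := ∀ (raw_name : String), Dom_parse_order_name raw_name → Spec_parse_order_name raw_name (parse_order_name raw_name)

-- ===== LEMMAS AND PROOFS =====

-- the common flat form: each uppercase char contributes [' ', c], others [c]
def pon_flat (t : List Char) : List Char :=
  t.flatMap (fun c => if PySem.Chars.isupper c then [' ', c] else [c])

-- the value both programs compute: first char verbatim, then the flat form of the tail
def pon_spec (cs : List Char) : List Char :=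
  match cs with
  | [] => []
  | c :: t => c :: pon_flat t

theorem pon_flat_nonupper (l : List Char) (h : ∀ x ∈ l, PySem.Chars.isupper x = false) :
    pon_flat l = l := by
  induction l with
  | nil => rfl
  | cons x xs ih =>
    have hx := h x (List.mem_cons_self)
    simp [pon_flat, hx] at ih ⊢
    exact ih (fun y hy => h y (List.mem_cons_of_mem _ hy))

-- ===== A side =====
theorem pon_foldA (cs acc : List Char) (h : acc ≠ []) :
    cs.foldl
      (fun (result : List Char) char =>
        (if PySem.Chars.isupper char && !result.isEmpty then result ++ [' '] else result) ++ [char])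
      acc = acc ++ pon_flat cs := by
  induction cs generalizing acc with
  | nil => simp [pon_flat]
  | cons c t ih =>
    have hne : acc.isEmpty = false := by simpa [List.isEmpty_iff] using h
    simp only [List.foldl_cons, hne]
    rw [ih _ (by by_cases hu : PySem.Chars.isupper c <;> simp [hu])]
    by_cases hu : PySem.Chars.isupper c <;> simp [hu, pon_flat]

theorem pon_A_eq (cs : List Char) :
    cs.foldl
      (fun (result : List Char) char =>
        (if PySem.Chars.isupper char && !result.isEmpty then result ++ [' '] else result) ++ [char])
      [] = pon_spec cs := by
  cases cs with
  | nil => rfl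
  | cons c t =>
    have h1 : (fun (result : List Char) char =>
        (if PySem.Chars.isupper char && !result.isEmpty then result ++ [' '] else result) ++ [char])
        [] c = [c] := by simp
    simp only [List.foldl_cons, h1]
    exact pon_foldA t [c] (by simp)

-- ===== B side =====
theorem pon_getD_shift (c : Char) (pre rest : List Char) (i : Nat) :
    (c :: (pre ++ rest)).getD (pre.length + 1 + i) ' ' = rest.getD i ' ' := by
  rw [List.getD_eq_getElem?_getD, List.getD_eq_getElem?_getD]
  have hdrop : List.drop (pre.length + 1) (c :: (pre ++ rest)) = rest := by
    have : (c :: (pre ++ rest)) = (c :: pre) ++ rest := by simp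
    rw [this, show pre.length + 1 = (c :: pre).length from by simp, List.drop_left]
  rw [show pre.length + 1 + i = (pre.length + 1) + i from rfl, ← List.getElem?_drop, hdrop]

theorem pon_cuts_cons (c u : Char) (pre post : List Char)
    (hpre : ∀ x ∈ pre, PySem.Chars.isupper x = false)
    (hu : PySem.Chars.isupper u = true) :
    pon_cuts (c :: (pre ++ u :: post)) =
      (pre.length + 1) :: (pon_cuts (u :: post)).map (fun k => (pre.length + 1) + k) := by
  unfold pon_cuts
  have hlen : (c :: (pre ++ u :: post)).length - 1 = pre.length + (1 + post.length) := by
    simp; omega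
  rw [hlen]
  have hsplit : List.range' 1 (pre.length + (1 + post.length)) =
      List.range' 1 pre.length ++ List.range' (1 + pre.length) (1 + post.length) := by
    rw [← List.range'_append]; simp
  rw [hsplit, List.filter_append]
  -- chars at positions 1..pre.length are the (non-upper) pre chars
  have h1 : (List.range' 1 pre.length).filter
      (fun i => PySem.Chars.isupper ((c :: (pre ++ u :: post)).getD i ' ')) = [] := by
    rw [List.filter_eq_nil_iff]
    intro i hi
    obtain ⟨h1i, h2i⟩ := List.mem_range'_1.mp hi
    obtain ⟨k, rfl⟩ : ∃ k, i = k + 1 := ⟨i - 1, by omega⟩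
    have hk : k < pre.length := by omega
    rw [List.getD_cons_succ, List.getD_eq_getElem?_getD, List.getElem?_append_left hk,
        List.getElem?_eq_getElem hk]
    simp [hpre _ (List.getElem_mem hk)]
  rw [h1, List.nil_append]
  -- split off position pre.length + 1 (the uppercase u)
  rw [show (1 : Nat) + post.length = post.length + 1 from by omega, List.range'_succ]
  rw [List.filter_cons]
  have hu' : PySem.Chars.isupper ((c :: (pre ++ u :: post)).getD (1 + pre.length) ' ') = true := by
    have hg := pon_getD_shift c pre (u :: post) 0
    rw [show 1 + pre.length = pre.length + 1 + 0 from by omega, hg]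
    simpa using hu
  rw [if_pos hu']
  -- the remaining range is the shifted range of (u :: post)
  have hshift : List.range' (1 + pre.length + 1) post.length =
      (List.range' 1 post.length).map (fun k => (pre.length + 1) + k) := by
    rw [List.range'_eq_map_range, List.range'_eq_map_range, List.map_map]
    apply List.map_congr_left
    intro x _
    simp [Function.comp]; omega
  rw [hshift, List.filter_map]
  have hcong : ∀ x ∈ List.range' 1 post.length,
      ((fun i => PySem.Chars.isupper ((c :: (pre ++ u :: post)).getD i ' ')) ∘
        (fun k => (pre.length + 1) + k)) x
      = (fun i => PySem.Chars.isupper ((u :: post).getD i ' ')) x := by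
    intro x _
    simp only [Function.comp]
    rw [show pre.length + 1 + x = pre.length + 1 + x from rfl, pon_getD_shift]
  rw [List.filter_congr hcong]
  have hlp : (u :: post).length - 1 = post.length := by simp
  rw [hlp]
  congr 1
  omega

theorem pon_cuts_nil (c : Char) (t : List Char)
    (h : ∀ x ∈ t, PySem.Chars.isupper x = false) : pon_cuts (c :: t) = [] := by
  unfold pon_cuts
  rw [List.filter_eq_nil_iff]
  intro i hi
  obtain ⟨h1i, h2i⟩ := List.mem_range'_1.mp hi
  obtain ⟨k, rfl⟩ : ∃ k, i = k + 1 := ⟨i - 1, by omega⟩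
  have hk : k < t.length := by simp at h2i; omega
  rw [List.getD_cons_succ, List.getD_eq_getElem?_getD, List.getElem?_eq_getElem hk]
  simp [h _ (List.getElem_mem hk)]

theorem pon_words_ne_nil (cs : List Char) : pon_words cs ≠ [] := by
  unfold pon_words
  cases h : pon_cuts cs ++ [cs.length] with
  | nil => simp at h
  | cons a l => simp

theorem pon_words_cons (c u : Char) (pre post : List Char)
    (hpre : ∀ x ∈ pre, PySem.Chars.isupper x = false)
    (hu : PySem.Chars.isupper u = true) :
    pon_words (c :: (pre ++ u :: post)) = (c :: pre) :: pon_words (u :: post) := by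
  unfold pon_words
  rw [pon_cuts_cons c u pre post hpre hu]
  have hn : (c :: (pre ++ u :: post)).length = (pre.length + 1) + (u :: post).length := by
    simp; omega
  rw [hn]
  set j0 := pre.length + 1 with hj0
  set K := pon_cuts (u :: post) with hK
  set n' := (u :: post).length with hn'
  have hlist : (j0 :: K.map (fun k => j0 + k)) ++ [j0 + n']
      = (List.map (fun k => j0 + k) (0 :: (K ++ [n']))) := by
    simp
  have hcons : (0 :: ((j0 :: K.map (fun k => j0 + k)) ++ [j0 + n']))
      = 0 :: j0 :: (K.map (fun k => j0 + k) ++ [j0 + n']) := by simp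
  rw [hcons]
  rw [show ((j0 :: K.map (fun k => j0 + k)) ++ [j0 + n'])
      = j0 :: (K.map (fun k => j0 + k) ++ [j0 + n']) from by simp]
  rw [List.zipWith_cons_cons]
  congr 1
  · -- first word is c :: pre
    have : ((c :: (pre ++ u :: post)).drop 0).take (j0 - 0) = c :: pre := by
      rw [List.drop_zero, Nat.sub_zero, hj0]
      rw [show pre.length + 1 = (c :: pre).length from by simp,
          show (c :: (pre ++ u :: post)) = (c :: pre) ++ (u :: post) from by simp,
          List.take_left]
    exact this
  · -- remaining words are the words of (u :: post)
    have hfirst : (j0 :: (K.map (fun k => j0 + k) ++ [j0 + n']))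
        = List.map (fun k => j0 + k) (0 :: (K ++ [n'])) := by simp
    have hsecond : (K.map (fun k => j0 + k) ++ [j0 + n'])
        = List.map (fun k => j0 + k) (K ++ [n']) := by simp
    rw [hfirst, hsecond, List.zipWith_map]
    have hdropj0 : List.drop j0 (c :: (pre ++ u :: post)) = u :: post := by
      rw [show (c :: (pre ++ u :: post)) = (c :: pre) ++ (u :: post) from by simp,
          hj0, show pre.length + 1 = (c :: pre).length from by simp, List.drop_left]
    have hfun : (fun (a b : Nat) =>
        (((c :: (pre ++ u :: post)).drop (j0 + a)).take ((j0 + b) - (j0 + a))))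
        = (fun (a b : Nat) => (((u :: post).drop a).take (b - a))) := by
      funext a b
      rw [show j0 + a = j0 + a from rfl, ← List.drop_drop, hdropj0, Nat.add_sub_add_left]
    rw [hfun]

theorem pon_icons (x : List Char) (l : List (List Char)) :
    [' '].intercalate (x :: l) = if l = [] then x else x ++ [' '] ++ [' '].intercalate l := by
  cases l <;> simp [List.intercalate]

theorem pon_main : ∀ (n : Nat) (cs : List Char), cs.length ≤ n →
    [' '].intercalate (pon_words cs) = pon_spec cs := by
  intro n
  induction n with
  | zero =>
    intro cs h
    have : cs = [] := List.length_eq_zero_iff.mp (Nat.le_zero.mp h)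
    subst this
    rfl
  | succ n ih =>
    intro cs h
    cases cs with
    | nil => rfl
    | cons c t =>
      cases hdw : t.dropWhile (fun x => !PySem.Chars.isupper x) with
      | nil =>
        -- no interior uppercase: single word, the whole string
        have hall : ∀ x ∈ t, PySem.Chars.isupper x = false := by
          intro x hx
          have := (List.dropWhile_eq_nil_iff.mp hdw) x hx
          simpa using this
        have hcuts := pon_cuts_nil c t hall
        have hwords : pon_words (c :: t) = [c :: t] := by
          unfold pon_words
          rw [hcuts]
          simp [List.take_length]
        rw [hwords, pon_icons, if_pos rfl]
        simp [pon_spec, pon_flat_nonupper t hall]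
      | cons u post =>
        set pre := t.takeWhile (fun x => !PySem.Chars.isupper x) with hpre'
        have hsplit : t = pre ++ u :: post := by
          rw [hpre', ← hdw, List.takeWhile_append_dropWhile]
        have hpre : ∀ x ∈ pre, PySem.Chars.isupper x = false := by
          intro x hx
          have := List.mem_takeWhile_imp hx
          simpa using this
        have hu : PySem.Chars.isupper u = true := by
          have hne : t.dropWhile (fun x => !PySem.Chars.isupper x) ≠ [] := by
            rw [hdw]; simp
          have hh := List.head_dropWhile_not (fun x => !PySem.Chars.isupper x) hne
          simp only [hdw, List.head_cons] at hh
          simpa using hh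
        have hlen : (u :: post).length ≤ n := by
          have h1 : (u :: post).length ≤ t.length := by
            rw [← hdw]; exact List.length_dropWhile_le _ _
          have h2 : (c :: t).length ≤ n + 1 := h
          simp only [List.length_cons] at h1 h2 ⊢
          omega
        rw [hsplit, pon_words_cons c u pre post hpre hu, pon_icons,
            if_neg (pon_words_ne_nil (u :: post)), ih (u :: post) hlen]
        simp only [pon_spec, pon_flat, List.flatMap_append]
        rw [show (pre.flatMap fun c => if PySem.Chars.isupper c then [' ', c] else [c]) = pon_flat pre from rfl,
            pon_flat_nonupper pre hpre]
        simp [hu]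

-- ===== VERDICT (by name: the statement is the Claim_ definition above) =====
theorem parse_order_name_spec : Claim_equal_parse_order_name := by
  intro raw_name _
  unfold Spec_parse_order_name parse_order_name parse_order_name_alt
  simp only []
  apply String.toList_inj.mp
  rw [PySem.Str.toList_join, String.toList_ofList, List.map_map]
  have hcomp : String.toList ∘ String.ofList = id := funext fun _ => String.toList_ofList
  rw [hcomp, List.map_id]
  have hjoin : PySem.Chars.join (" " : String).toList
      (pon_words (PySem.Str.replace raw_name "_Order_Default" "").toList)
      = [' '].intercalate (pon_words (PySem.Str.replace raw_name "_Order_Default" "").toList) := rfl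
  rw [hjoin, pon_main _ _ (Nat.le_refl _), pon_A_eq]
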